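-- pv_equiv track=rewrite | github.com/melodist/CodingPractice | src/programmers/Split String.py | solution
-- ===== SOURCE A (Python) =====
-- def solution(s):
--     answer = 0
--     cnt_first = 0
--     cnt_others = 0
--
--     for c in s:
--         if cnt_first == cnt_others:
--             answer += 1
--             first = c
--
--         if c == first:
--             cnt_first += 1
--         else:
--             cnt_others += 1
--
--     return answer
-- ===== SOURCE B (Python) =====
-- def solution(s):
--     # Segment decomposition: each segment starts at index i and ends where
--     # matches of its leading character equal the non-matches; count segments.
--     ans = 0
--     i = 0
--     n = len(s)
--     while i < n:
--         ans += 1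
--         i = _segment_end(s, i)
--     return ans
--
--
-- def _segment_end(s, i):
--     first = s[i]
--     m, o = 1, 0
--     j = i + 1
--     n = len(s)
--     while j < n and m != o:
--         if s[j] == first:
--             m += 1
--         else:
--             o += 1
--         j += 1
--     return j
-- ===== Notes on version B (the rewrite author's own statement) =====
-- stated objective: alternative
-- what changed: A's flat single-pass state machine with running global counters is replaced by an explicit segment decomposition: an outer loop over segment start indices with an inner scan that finds each balanced segment's end.
import Mathlib
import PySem

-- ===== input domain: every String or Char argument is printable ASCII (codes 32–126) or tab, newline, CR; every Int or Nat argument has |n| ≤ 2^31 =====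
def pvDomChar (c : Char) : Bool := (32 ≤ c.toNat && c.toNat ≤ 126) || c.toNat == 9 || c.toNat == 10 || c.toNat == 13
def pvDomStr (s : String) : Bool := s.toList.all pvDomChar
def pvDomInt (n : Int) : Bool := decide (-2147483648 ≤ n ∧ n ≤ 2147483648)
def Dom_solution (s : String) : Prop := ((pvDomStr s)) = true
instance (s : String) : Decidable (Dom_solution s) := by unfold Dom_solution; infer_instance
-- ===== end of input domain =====

-- B replaces A's flat counter state machine by an explicit segment decomposition: find each balanced segment's end, count segments (alternative decomposition, same cost).

-- ===== PORT A =====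
-- state: (answer, cnt_first, cnt_others, first); Python's `first` is unset before
-- the first iteration but always assigned there (cnt_first == cnt_others initially),
-- so an arbitrary initial char (' ') is never read.
def solutionStep (st : Int × Int × Int × Char) (c : Char) : Int × Int × Int × Char :=
  let ans := if st.2.1 == st.2.2.1 then st.1 + 1 else st.1
  let f := if st.2.1 == st.2.2.1 then c else st.2.2.2
  if c == f then (ans, st.2.1 + 1, st.2.2.1, f) else (ans, st.2.1, st.2.2.1 + 1, f)

def solution (s : String) : Int :=
  (s.toList.foldl solutionStep (0, 0, 0, ' ')).1

-- ===== PORT B =====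
-- _segment_end's inner while loop from Source B (j, m, o are the loop state);
-- fuel = remaining list length is only a structural totality guard: the loop
-- advances j by 1 each step, so l.length - j fuel never runs out early
def segEndF (l : List Char) (first : Char) : Nat → Int → Int → Nat → Nat
  | 0, _, _, j => j
  | fuel + 1, m, o, j =>
    if h : j < l.length ∧ m ≠ o then
      if l[j]'h.1 = first then segEndF l first fuel (m + 1) o (j + 1)
      else segEndF l first fuel m (o + 1) (j + 1)
    else j

def segEnd (l : List Char) (first : Char) (m o : Int) (j : Nat) : Nat :=
  segEndF l first (l.length - j) m o j

-- Source B's outer while loop over segment start indices; fuel = remaining length,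
-- again only a totality guard (each iteration advances i by at least 1)
def solveLoopF (l : List Char) : Nat → Int → Nat → Int
  | 0, ans, _ => ans
  | fuel + 1, ans, i =>
    if h : i < l.length then
      solveLoopF l fuel (ans + 1) (segEnd l (l[i]'h) 1 0 (i + 1))
    else ans

def solveLoop (l : List Char) (ans : Int) (i : Nat) : Int :=
  solveLoopF l (l.length - i) ans i

def solution_alt (s : String) : Int := solveLoop s.toList 0 0

-- ===== PRECONDITION & SPEC =====
def Spec_solution (s : String) (out : Int) : Prop := out = solution_alt s
instance (s : String) (out : Int) : Decidable (Spec_solution s out) := by unfold Spec_solution; infer_instance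

-- ===== CLAIM (what is proved, stated in full; the proofs are below) =====
def Claim_equal_solution : Prop := ∀ (s : String), Dom_solution s → Spec_solution s (solution s)

-- ===== LEMMAS AND PROOFS =====

-- proof-side recursive version of B's segment scan, on suffix lists
def consume (first : Char) (m o : Int) : List Char → List Char
  | [] => []
  | c :: rest =>
    if c = first then
      if m + 1 = o then rest else consume first (m + 1) o rest
    else
      if m = o + 1 then rest else consume first m (o + 1) rest

theorem consume_length_le (first : Char) (m o : Int) (l : List Char) :
    (consume first m o l).length ≤ l.length := by
  induction l generalizing m o with
  | nil => simp [consume]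
  | cons c rest ih =>
    simp only [consume]
    split
    · split
      · simp
      · exact Nat.le_succ_of_le (ih _ _)
    · split
      · simp
      · exact Nat.le_succ_of_le (ih _ _)

-- proof-side recursive segment counter
def solGo : List Char → Int
  | [] => 0
  | c :: rest => 1 + solGo (consume c 1 0 rest)
termination_by l => l.length
decreasing_by
  exact Nat.lt_succ_of_le (consume_length_le c 1 0 rest)

-- when the fuel is sufficient, segEndF never advances past the end of the list
theorem segEndF_ge (l : List Char) (first : Char) (fuel : Nat) :
    ∀ (m o : Int) (j : Nat), j ≤ segEndF l first fuel m o j := by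
  induction fuel with
  | zero => intro m o j; simp [segEndF]
  | succ fuel ih =>
    intro m o j
    rw [segEndF]
    by_cases h : j < l.length ∧ m ≠ o
    · rw [dif_pos h]
      split
      · exact le_trans (Nat.le_succ j) (ih ..)
      · exact le_trans (Nat.le_succ j) (ih ..)
    · rw [dif_neg h]

-- with balanced counters segEndF stops immediately
theorem segEndF_balanced (l : List Char) (first : Char) (fuel : Nat) (m o : Int) (j : Nat)
    (h : m = o) : segEndF l first fuel m o j = j := by
  cases fuel with
  | zero => rfl
  | succ fuel => rw [segEndF, dif_neg (by simp [h])]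

-- segEnd is consume, expressed through dropping a prefix
theorem drop_segEndF (l : List Char) (first : Char) (fuel : Nat) :
    ∀ (m o : Int) (j : Nat), l.length - j ≤ fuel → m ≠ o →
    l.drop (segEndF l first fuel m o j) = consume first m o (l.drop j) := by
  induction fuel with
  | zero =>
    intro m o j hn hne
    rw [segEndF, List.drop_eq_nil_of_le (by omega)]
    simp [consume]
  | succ fuel ih =>
    intro m o j hn hne
    by_cases hj : j < l.length
    · rw [segEndF, dif_pos ⟨hj, hne⟩, List.drop_eq_getElem_cons hj, consume]
      by_cases hc : l[j] = first
      · rw [if_pos hc, if_pos hc]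
        by_cases hb : m + 1 = o
        · rw [if_pos hb, segEndF_balanced l first fuel _ _ _ hb]
        · rw [if_neg hb]
          exact ih _ _ _ (by omega) hb
      · rw [if_neg hc, if_neg hc]
        by_cases hb : m = o + 1
        · rw [if_pos hb, segEndF_balanced l first fuel _ _ _ hb]
        · rw [if_neg hb]
          exact ih _ _ _ (by omega) hb
    · rw [segEndF, dif_neg (by omega), List.drop_eq_nil_of_le (by omega)]
      simp [consume]

-- B's iterative loop computes the recursive segment count of the remaining suffix
theorem solveLoopF_eq_solGo (l : List Char) (fuel : Nat) :
    ∀ (ans : Int) (i : Nat), l.length - i ≤ fuel →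
    solveLoopF l fuel ans i = ans + solGo (l.drop i) := by
  induction fuel with
  | zero =>
    intro ans i hn
    rw [solveLoopF, List.drop_eq_nil_of_le (by omega)]
    simp [solGo]
  | succ fuel ih =>
    intro ans i hn
    by_cases h : i < l.length
    · have hge := segEndF_ge l (l[i]'h) (l.length - (i + 1)) 1 0 (i + 1)
      rw [solveLoopF, dif_pos h, segEnd,
        ih _ _ (by omega),
        List.drop_eq_getElem_cons h, solGo,
        drop_segEndF l (l[i]'h) (l.length - (i + 1)) 1 0 (i + 1) (by omega) (by omega)]
      ring
    · rw [solveLoopF, dif_neg h, List.drop_eq_nil_of_le (by omega)]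
      simp [solGo]

-- characterization of A's loop body as nested conditionals on equalities
theorem step_eq (ans cf co : Int) (f c : Char) :
    solutionStep (ans, cf, co, f) c =
      if cf = co then (ans + 1, cf + 1, co, c)
      else if c = f then (ans, cf + 1, co, f) else (ans, cf, co + 1, f) := by
  simp only [solutionStep]
  by_cases h : cf = co
  · simp [h]
  · by_cases hc : c = f <;> simp [h, hc]

-- shifting both counters by k does not change A's fold (only their difference matters)
theorem foldA_shift (l : List Char) : ∀ (ans cf co k : Int) (f : Char),
    (l.foldl solutionStep (ans, cf + k, co + k, f)).1 =
    (l.foldl solutionStep (ans, cf, co, f)).1 := by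
  induction l with
  | nil => intros; rfl
  | cons c rest ih =>
    intro ans cf co k f
    rw [List.foldl_cons, List.foldl_cons, step_eq, step_eq]
    by_cases h : cf = co
    · rw [if_pos (by omega : cf + k = co + k), if_pos h]
      have := ih (ans + 1) (cf + 1) co k c
      rw [show cf + 1 + k = cf + k + 1 by ring] at this
      exact this
    · rw [if_neg (by omega : ¬ cf + k = co + k), if_neg h]
      by_cases hc : c = f
      · rw [if_pos hc, if_pos hc]
        have := ih ans (cf + 1) co k f
        rw [show cf + 1 + k = cf + k + 1 by ring] at this
        exact this
      · rw [if_neg hc, if_neg hc]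
        have := ih ans cf (co + 1) k f
        rw [show co + 1 + k = co + k + 1 by ring] at this
        exact this

-- in-segment lemma: while the counters are unbalanced, A's fold over l equals the fold,
-- from a balanced state, over the suffix that `consume` leaves
theorem foldA_consume (l : List Char) : ∀ (ans cf co m o : Int) (f : Char),
    cf - co = m - o → m ≠ o →
    (l.foldl solutionStep (ans, cf, co, f)).1 =
    ((consume f m o l).foldl solutionStep (ans, 0, 0, f)).1 := by
  induction l with
  | nil => intro ans cf co m o f hd hne; simp [consume]
  | cons c rest ih =>
    intro ans cf co m o f hd hne
    rw [List.foldl_cons, step_eq, if_neg (by omega : ¬ cf = co)]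
    simp only [consume]
    by_cases hc : c = f
    · rw [if_pos hc, if_pos hc]
      by_cases hb : m + 1 = o
      · rw [if_pos hb, show cf + 1 = co by omega]
        have := foldA_shift rest ans 0 0 co f
        simpa using this
      · rw [if_neg hb]
        exact ih ans (cf + 1) co (m + 1) o f (by omega) hb
    · rw [if_neg hc, if_neg hc]
      by_cases hb : m = o + 1
      · rw [if_pos hb, show cf = co + 1 by omega]
        have := foldA_shift rest ans 0 0 (co + 1) f
        simpa using this
      · rw [if_neg hb]
        exact ih ans cf (co + 1) m (o + 1) f (by omega) hb

-- main: from any balanced state, A's fold counts exactly the segments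
theorem foldA_eq_solGo (n : Nat) : ∀ (l : List Char), l.length ≤ n → ∀ (ans : Int) (f : Char),
    (l.foldl solutionStep (ans, 0, 0, f)).1 = ans + solGo l := by
  induction n with
  | zero =>
    intro l hlen ans f
    have : l = [] := List.eq_nil_of_length_eq_zero (Nat.le_zero.mp hlen)
    simp [this, solGo]
  | succ n ih =>
    intro l hlen ans f
    cases l with
    | nil => simp [solGo]
    | cons c rest =>
      rw [List.foldl_cons, step_eq, if_pos rfl, show (0:Int) + 1 = 1 by ring]
      rw [foldA_consume rest (ans + 1) 1 0 1 0 c (by ring) (by omega)]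
      rw [ih (consume c 1 0 rest)
        (le_trans (consume_length_le c 1 0 rest) (Nat.le_of_succ_le_succ hlen)) (ans + 1) c]
      rw [solGo]
      ring

-- ===== VERDICT (by name: the statement is the Claim_ definition above) =====
theorem solution_spec : Claim_equal_solution := by
  intro s _
  unfold Spec_solution solution solution_alt
  rw [solveLoop, solveLoopF_eq_solGo s.toList _ 0 0 (by omega), List.drop_zero]
  have h := foldA_eq_solGo s.toList.length s.toList (le_refl _) 0 ' '
  simpa using h
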